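-- pv_equiv track=rewrite | github.com/dineshs14/Gitradius | agentic_runner.py | build_code_view
-- ===== SOURCE A (Python) =====
-- def build_code_view(files: dict[str, str], max_total_chars: int = 40_000) -> str:
--     """
--     Combine file contents into a single string for the LLM.
--     Trims to max_total_chars total to avoid blowing the context window.
--     """
--     parts: list[str] = []
--     total = 0
--     for rel, content in sorted(files.items()):
--         header = f"\n{'='*60}\nFILE: {rel}\n{'='*60}\n"
--         snippet = header + content
--         if total + len(snippet) > max_total_chars:
--             parts.append(f"\n... [remaining files omitted — context window limit reached] ...")
--             break
--         parts.append(snippet)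
--         total += len(snippet)
--     return "\n".join(parts)
-- ===== SOURCE B (Python) =====
-- def build_code_view(files: dict[str, str], max_total_chars: int = 40_000) -> str:
--     """Snippets first, prefix sums second, then a single cutoff decision."""
--     snippets = [
--         "\n" + "=" * 60 + "\nFILE: " + rel + "\n" + "=" * 60 + "\n" + content
--         for rel, content in sorted(files.items())
--     ]
--     totals = []
--     running = 0
--     for s in snippets:
--         running += len(s)
--         totals.append(running)
--     cut = next((i for i, t in enumerate(totals) if t > max_total_chars), None)
--     if cut is None:
--         return "\n".join(snippets)
--     return "\n".join(
--         snippets[:cut]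
--         + ["\n... [remaining files omitted — context window limit reached] ..."]
--     )
-- ===== Notes on version B (the rewrite author's own statement) =====
-- stated objective: alternative
-- what changed: Replaces A's single accumulate-and-break loop by three separate passes: build all snippets, compute prefix character sums, then locate the first cutoff index and join either everything or the kept prefix plus the omitted marker. Pre_ only excludes association lists with duplicate keys, which do not represent any Python dict.
import Mathlib
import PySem

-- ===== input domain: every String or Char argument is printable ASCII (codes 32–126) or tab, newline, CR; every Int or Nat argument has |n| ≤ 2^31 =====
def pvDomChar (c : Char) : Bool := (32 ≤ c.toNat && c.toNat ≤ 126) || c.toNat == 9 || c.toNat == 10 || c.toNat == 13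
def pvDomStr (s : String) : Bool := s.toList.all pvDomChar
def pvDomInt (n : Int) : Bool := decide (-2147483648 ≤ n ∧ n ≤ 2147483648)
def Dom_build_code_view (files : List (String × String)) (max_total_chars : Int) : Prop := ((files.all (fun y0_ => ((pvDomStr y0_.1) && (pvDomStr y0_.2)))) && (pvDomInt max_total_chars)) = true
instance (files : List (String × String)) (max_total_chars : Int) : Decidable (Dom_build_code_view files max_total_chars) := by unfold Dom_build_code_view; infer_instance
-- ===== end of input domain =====

-- B replaces A's accumulate-and-break loop by separate passes (snippets, prefix sums, cutoff index); same results.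

-- shared string constants (the '='*60 bar and the omitted-marker line, verbatim from the Python)
def pvBar : String := String.ofList (List.replicate 60 '=')
def pvOmit : String := "\n... [remaining files omitted — context window limit reached] ..."

-- ===== PORT A =====
-- A's for-loop with `break`: structural recursion carrying (total, parts)
def pvLoopA (maxc : Int) : List (String × String) → Int → List String → List String
  | [], _, parts => parts
  | (rel, content) :: rest, total, parts =>
    let header := "\n" ++ pvBar ++ "\nFILE: " ++ rel ++ "\n" ++ pvBar ++ "\n"
    let snippet := header ++ content
    if total + PySem.Str.len snippet > maxc then
      parts ++ [pvOmit]
    else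
      pvLoopA maxc rest (total + PySem.Str.len snippet) (parts ++ [snippet])

def build_code_view (files : List (String × String)) (max_total_chars : Int) : String :=
  PySem.Str.join "\n" (pvLoopA max_total_chars (PySem.List.sorted2 files Prod.fst Prod.snd false) 0 [])

-- ===== PORT B =====
-- pass 1: the snippet of one (rel, content) pair
def pvSnippet (p : String × String) : String :=
  "\n" ++ pvBar ++ "\nFILE: " ++ p.1 ++ "\n" ++ pvBar ++ "\n" ++ p.2

-- pass 2: running prefix sums of the snippet lengths
def pvTotals : List String → Int → List Int
  | [], _ => []
  | s :: rest, running => (running + PySem.Str.len s) :: pvTotals rest (running + PySem.Str.len s)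

-- pass 3: first index whose prefix sum exceeds the limit (Source B's next(…, None))
def pvCut : List Int → Int → Option Nat
  | [], _ => none
  | t :: rest, maxc => if t > maxc then some 0 else (pvCut rest maxc).map (· + 1)

def build_code_view_alt (files : List (String × String)) (max_total_chars : Int) : String :=
  let snippets := (PySem.List.sorted2 files Prod.fst Prod.snd false).map pvSnippet
  match pvCut (pvTotals snippets 0) max_total_chars with
  | none => PySem.Str.join "\n" snippets
  | some cut => PySem.Str.join "\n" (snippets.take cut ++ [pvOmit])

-- ===== PRECONDITION & SPEC =====
-- Pre_ excludes association lists with duplicate keys: they do not represent any Python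
-- dict (the dict would collapse them, last value winning), so no dict input is excluded.
def Pre_build_code_view (files : List (String × String)) (_max_total_chars : Int) : Prop :=
  (files.map Prod.fst).Nodup
instance (files : List (String × String)) (max_total_chars : Int) : Decidable (Pre_build_code_view files max_total_chars) := by unfold Pre_build_code_view; infer_instance

def pvWitness_build_code_view : (List (String × String)) × Int := ([("a.py", "x = 1"), ("b.py", "y = 2")], 500)

def Spec_build_code_view (files : List (String × String)) (max_total_chars : Int) (out : String) : Prop := out = build_code_view_alt files max_total_chars
instance (files : List (String × String)) (max_total_chars : Int) (out : String) : Decidable (Spec_build_code_view files max_total_chars out) := by unfold Spec_build_code_view; infer_instance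

-- ===== CLAIM (what is proved, stated in full; the proofs are below) =====
def Claim_equal_build_code_view : Prop := ∀ (files : List (String × String)) (max_total_chars : Int), Dom_build_code_view files max_total_chars → Pre_build_code_view files max_total_chars → Spec_build_code_view files max_total_chars (build_code_view files max_total_chars)

-- ===== LEMMAS AND PROOFS =====

theorem pvWitness_ok : Dom_build_code_view pvWitness_build_code_view.1 pvWitness_build_code_view.2 ∧ Pre_build_code_view pvWitness_build_code_view.1 pvWitness_build_code_view.2 := by
  constructor <;> decide

-- A's loop, started at any (total, parts), equals B's cutoff computation on the remaining list.
theorem pvLoopA_eq (maxc : Int) :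
    ∀ (l : List (String × String)) (total : Int) (parts : List String),
      pvLoopA maxc l total parts =
        match pvCut (pvTotals (l.map pvSnippet) total) maxc with
        | none => parts ++ l.map pvSnippet
        | some cut => parts ++ ((l.map pvSnippet).take cut ++ [pvOmit]) := by
  intro l
  induction l with
  | nil => intro total parts; simp [pvLoopA, pvTotals, pvCut]
  | cons p rest ih =>
    intro total parts
    obtain ⟨rel, content⟩ := p
    show pvLoopA maxc ((rel, content) :: rest) total parts = _
    rw [pvLoopA]
    by_cases h : total + PySem.Str.len (("\n" ++ pvBar ++ "\nFILE: " ++ rel ++ "\n" ++ pvBar ++ "\n") ++ content) > maxc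
    · simp only [List.map_cons, pvTotals, pvCut, pvSnippet, if_pos h]
      simp
    · simp only [List.map_cons, pvTotals, pvCut, pvSnippet, if_neg h]
      rw [ih]
      cases pvCut (pvTotals (rest.map pvSnippet)
          (total + PySem.Str.len (("\n" ++ pvBar ++ "\nFILE: " ++ rel ++ "\n" ++ pvBar ++ "\n") ++ content))) maxc with
      | none => simp
      | some cut => simp

-- ===== VERDICT (by name: the statement is the Claim_ definition above) =====
theorem build_code_view_spec : Claim_equal_build_code_view := by
  intro files maxc _hDom _hPre
  show build_code_view files maxc = build_code_view_alt files maxc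
  unfold build_code_view build_code_view_alt
  rw [pvLoopA_eq]
  rcases hc : pvCut (pvTotals ((PySem.List.sorted2 files Prod.fst Prod.snd false).map pvSnippet) 0) maxc with _ | cut <;>
    simp [hc]
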